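-- pv_equiv track=rewrite | github.com/jim-donovan/ichra-calculator | contribution_strategies.py | _get_age_tier
-- ===== SOURCE A (Python) =====
-- AGE_TIERS = [
--     {'age_range': '21', 'age_min': 21, 'age_max': 21},
--     {'age_range': '18-25', 'age_min': 18, 'age_max': 25},
--     {'age_range': '26-35', 'age_min': 26, 'age_max': 35},
--     {'age_range': '36-45', 'age_min': 36, 'age_max': 45},
--     {'age_range': '46-55', 'age_min': 46, 'age_max': 55},
--     {'age_range': '56-63', 'age_min': 56, 'age_max': 63},
--     {'age_range': '64+', 'age_min': 64, 'age_max': 99},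
-- ]
--
-- def _get_age_tier(age: int) -> str:
--     """Get the age tier for a given age"""
--     # Check for exact age 21 first
--     if age == 21:
--         return '21'
--     # Then check other tiers
--     for tier in AGE_TIERS:
--         if tier['age_range'] == '21':
--             continue  # Skip standalone 21 tier
--         if tier['age_min'] <= age <= tier['age_max']:
--             return tier['age_range']
--     # Fallback for ages under 18
--     return '18-25'
-- ===== SOURCE B (Python) =====
-- def _get_age_tier(age: int) -> str:
--     if age == 21:
--         return '21'
--     if age < 26 or age > 99:
--         return '18-25'
--     if age >= 64:
--         return '64+'
--     if age >= 56:
--         return '56-63'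
--     lo = 26 + 10 * ((age - 26) // 10)
--     return f"{lo}-{lo + 9}"
-- ===== Notes on version B (the rewrite author's own statement) =====
-- stated objective: alternative
-- what changed: Replaced the AGE_TIERS table scan by arithmetic: the three regular decade tiers (26-55) are computed with a closed-form formula lo = 26 + 10*((age-26)//10) and the label is built as f"{lo}-{lo+9}", with only the irregular ends (21, <26/>99 fallback, 56-63, 64+) handled by comparisons.
import Mathlib
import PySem

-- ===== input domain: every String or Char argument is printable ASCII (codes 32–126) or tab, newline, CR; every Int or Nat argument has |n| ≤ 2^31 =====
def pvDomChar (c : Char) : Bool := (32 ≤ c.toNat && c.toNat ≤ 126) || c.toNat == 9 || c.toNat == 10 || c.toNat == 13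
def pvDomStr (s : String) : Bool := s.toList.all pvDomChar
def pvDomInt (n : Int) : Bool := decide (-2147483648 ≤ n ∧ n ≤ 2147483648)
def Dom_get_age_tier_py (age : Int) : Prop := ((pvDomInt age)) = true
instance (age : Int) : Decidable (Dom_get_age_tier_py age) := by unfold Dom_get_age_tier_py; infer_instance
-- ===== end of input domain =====

-- B replaces the AGE_TIERS table scan by arithmetic: the regular decade tiers are computed
-- by a closed-form bucket formula and the label string is built from numbers (alternative).

-- ===== PORT A =====
-- AGE_TIERS entries as (age_range, age_min, age_max)
def pvAGE_TIERS : List (String × Int × Int) :=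
  [("21", 21, 21), ("18-25", 18, 25), ("26-35", 26, 35), ("36-45", 36, 45),
   ("46-55", 46, 55), ("56-63", 56, 63), ("64+", 64, 99)]

-- the 'for tier in AGE_TIERS' loop with its continue and early return
def pvTierLoop (age : Int) : List (String × Int × Int) → String
  | [] => "18-25"
  | (rng, lo, hi) :: rest =>
      if rng = "21" then pvTierLoop age rest
      else if lo ≤ age ∧ age ≤ hi then rng
      else pvTierLoop age rest

def get_age_tier_py (age : Int) : String :=
  if age = 21 then "21" else pvTierLoop age pvAGE_TIERS

-- ===== PORT B =====
def get_age_tier_py_alt (age : Int) : String :=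
  if age = 21 then "21"
  else if age < 26 ∨ age > 99 then "18-25"
  else if age ≥ 64 then "64+"
  else if age ≥ 56 then "56-63"
  else
    let lo := 26 + 10 * (PySem.Int.floordiv (age - 26) 10)
    PySem.Int.toStr lo ++ "-" ++ PySem.Int.toStr (lo + 9)

-- ===== PRECONDITION & SPEC =====
def Spec_get_age_tier_py (age : Int) (out : String) : Prop := out = get_age_tier_py_alt age
instance (age : Int) (out : String) : Decidable (Spec_get_age_tier_py age out) := by unfold Spec_get_age_tier_py; infer_instance

-- ===== CLAIM (what is proved, stated in full; the proofs are below) =====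
def Claim_equal_get_age_tier_py : Prop := ∀ (age : Int), Dom_get_age_tier_py age → Spec_get_age_tier_py age (get_age_tier_py age)

-- ===== LEMMAS AND PROOFS =====

-- ===== VERDICT (by name: the statement is the Claim_ definition above) =====
theorem get_age_tier_py_spec : Claim_equal_get_age_tier_py := by
  intro age _
  unfold Spec_get_age_tier_py
  by_cases h : 18 ≤ age ∧ age ≤ 99
  · obtain ⟨h1, h2⟩ := h
    interval_cases age <;> decide
  · -- outside 18..99 both programs return "18-25"
    unfold get_age_tier_py get_age_tier_py_alt pvAGE_TIERS
    simp only [pvTierLoop, String.reduceEq, if_true, if_false]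
    split_ifs <;> first | rfl | omega
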